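-- pv_equiv track=rewrite | github.com/OumaymaJellali1/RAG | WebFilter-main/verl/utils/reward_score/webfilter_SR_reward.py | check_tags_balance
-- ===== SOURCE A (Python) =====
-- def check_tags_balance(solution_str: str) -> bool:
--     """Check whether tags are correctly paired
--
--     Args:
--         solution_str: The string to check
--
--     Returns:
--         bool: Whether all tags are correctly paired
--     """
--     # Tag pairs to check
--     tags_to_check = ['tool_call', 'think', 'answer']
--
--     for tag in tags_to_check:
--         # Count the number of start and end tags
--         start_tag = f"<{tag}>"
--         end_tag = f"</{tag}>"
--
--         start_count = solution_str.count(start_tag)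
--         end_count = solution_str.count(end_tag)
--
--         # If the numbers of start and end tags are not equal, return False
--         if start_count != end_count:
--             return False
--
--         # Check nesting order (ensure the end tag doesn't appear before the start tag)
--         last_pos = -1
--         while True:
--             start_pos = solution_str.find(start_tag, last_pos + 1)
--             if start_pos == -1:
--                 break
--
--             end_pos = solution_str.find(end_tag, start_pos)
--             if end_pos == -1:
--                 return False
--
--             last_pos = end_pos
--
--     return True
-- ===== SOURCE B (Python) =====
-- def check_tags_balance(solution_str: str) -> bool:
--     """Check whether tags are correctly paired (alternative: precompute all tag
--     positions once, then match greedily with two index pointers instead of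
--     re-scanning the string with find)."""
--     n = len(solution_str)
--     for tag in ('tool_call', 'think', 'answer'):
--         start_tag = f"<{tag}>"
--         end_tag = f"</{tag}>"
--         if solution_str.count(start_tag) != solution_str.count(end_tag):
--             return False
--         starts = [i for i in range(n) if solution_str.startswith(start_tag, i)]
--         ends = [i for i in range(n) if solution_str.startswith(end_tag, i)]
--         j = 0
--         last = -1
--         for sp in starts:
--             if sp <= last:
--                 continue  # nested/overlapping start already covered
--             while j < len(ends) and ends[j] < sp:
--                 j += 1
--             if j == len(ends):
--                 return False
--             last = ends[j]
--             j += 1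
--     return True
-- ===== Notes on version B (the rewrite author's own statement) =====
-- stated objective: alternative
-- what changed: Instead of A's while-loop that repeatedly re-scans the string with find, B precomputes the ordered lists of all start-tag and end-tag positions once per tag and performs the same greedy matching with a two-pointer walk over those lists.
import Mathlib
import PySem

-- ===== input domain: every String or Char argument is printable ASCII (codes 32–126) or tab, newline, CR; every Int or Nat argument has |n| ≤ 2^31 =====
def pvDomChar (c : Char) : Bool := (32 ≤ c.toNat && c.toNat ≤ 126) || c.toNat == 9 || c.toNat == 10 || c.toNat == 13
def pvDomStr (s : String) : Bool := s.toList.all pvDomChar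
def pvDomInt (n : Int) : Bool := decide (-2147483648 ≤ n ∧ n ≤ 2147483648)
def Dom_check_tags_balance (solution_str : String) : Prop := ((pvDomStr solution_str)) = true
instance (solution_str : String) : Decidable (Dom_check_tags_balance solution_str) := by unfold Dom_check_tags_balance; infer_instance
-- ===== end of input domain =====

-- B re-implements the tag check by precomputing the lists of start/end tag positions once and
-- matching them with a two-pointer greedy pass, instead of A's repeated find-rescans of the string.

-- ===== PORT A =====
-- f"<{tag}>" / f"</{tag}>"
def pvStartTag (tag : List Char) : List Char := '<' :: (tag ++ ['>'])
def pvEndTag (tag : List Char) : List Char := '<' :: '/' :: (tag ++ ['>'])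

-- A's 'while True' loop; the fuel only makes the recursion structural, it is never
-- exhausted on the call A makes (fuel = len+1 bounds the number of iterations).
def pvLoopA (cs st et : List Char) : Nat → Int → Bool
  | 0, _ => true
  | fuel + 1, last_pos =>
    let start_pos := PySem.Chars.findFrom cs st (last_pos + 1) none
    if start_pos = -1 then true
    else
      let end_pos := PySem.Chars.findFrom cs et start_pos none
      if end_pos = -1 then false
      else pvLoopA cs st et fuel end_pos

-- the body of A's 'for tag in tags_to_check' (early return False = all)
def pvCheckTagA (cs : List Char) (tag : List Char) : Bool :=
  let start_tag := pvStartTag tag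
  let end_tag := pvEndTag tag
  if PySem.Chars.count cs start_tag ≠ PySem.Chars.count cs end_tag then false
  else pvLoopA cs start_tag end_tag (cs.length + 1) (-1)

def check_tags_balance (solution_str : String) : Bool :=
  ["tool_call".toList, "think".toList, "answer".toList].all (pvCheckTagA solution_str.toList)

-- ===== PORT B =====
-- [i for i in range(len(s)) if s.startswith(p, i)]  (s.startswith(p, i) with 0 ≤ i is exactly
-- 'p is a prefix of s[i:]', ported as startswith of the dropped list)
def pvPositions (cs p : List Char) : List Int :=
  (PySem.List.pyRange 0 cs.length 1).filter
    (fun i => PySem.Chars.startswith (cs.drop i.toNat) p)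

-- 'while j < len(ends) and ends[j] < sp: j += 1'
def pvAdvance (E : List Int) (sp : Int) (j : Nat) : Nat :=
  if h : j < E.length then
    if E[j] < sp then pvAdvance E sp (j + 1) else j
  else j
termination_by E.length - j

-- 'for sp in starts: …' with the end pointer j and last matched end position
def pvLoopB (E : List Int) : List Int → Nat → Int → Bool
  | [], _, _ => true
  | sp :: rest, j, last =>
    if sp ≤ last then pvLoopB E rest j last
    else
      let j' := pvAdvance E sp j
      if h : j' < E.length then pvLoopB E rest (j' + 1) E[j'] else false

def pvCheckTagB (cs : List Char) (tag : List Char) : Bool :=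
  let start_tag := pvStartTag tag
  let end_tag := pvEndTag tag
  if PySem.Chars.count cs start_tag ≠ PySem.Chars.count cs end_tag then false
  else pvLoopB (pvPositions cs end_tag) (pvPositions cs start_tag) 0 (-1)

def check_tags_balance_alt (solution_str : String) : Bool :=
  ["tool_call".toList, "think".toList, "answer".toList].all (pvCheckTagB solution_str.toList)

-- ===== PRECONDITION & SPEC =====
def Spec_check_tags_balance (solution_str : String) (out : Bool) : Prop := out = check_tags_balance_alt solution_str
instance (solution_str : String) (out : Bool) : Decidable (Spec_check_tags_balance solution_str out) := by unfold Spec_check_tags_balance; infer_instance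

-- ===== CLAIM (what is proved, stated in full; the proofs are below) =====
def Claim_equal_check_tags_balance : Prop := ∀ (solution_str : String), Dom_check_tags_balance solution_str → Spec_check_tags_balance solution_str (check_tags_balance solution_str)

-- ===== LEMMAS AND PROOFS =====

lemma mem_pvPositions {cs p : List Char} {x : Int} :
    x ∈ pvPositions cs p ↔ 0 ≤ x ∧ x < cs.length ∧ p <+: cs.drop x.toNat := by
  simp [pvPositions, List.mem_filter, PySem.List.mem_pyRange_one, PySem.Chars.startswith_iff,
    and_assoc]

lemma pairwise_pvPositions (cs p : List Char) : (pvPositions cs p).Pairwise (· < ·) :=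
  (PySem.List.pairwise_lt_pyRange_one 0 cs.length).filter _

-- find? returns the element at the first index whose entries before all fail the test
lemma find?_first {L : List Int} {q : Int → Bool} {j : Nat} (hj : j < L.length)
    (hb : ∀ i, (h : i < L.length) → i < j → q L[i] = false) (hq : q L[j] = true) :
    L.find? q = some L[j] := by
  induction L generalizing j with
  | nil => simp at hj
  | cons a t ih =>
    cases j with
    | zero =>
      have hqa : q a = true := by simpa using hq
      simp [List.find?, hqa]
    | succ k =>
      have ha : q a = false := hb 0 (by simp) (Nat.succ_pos k)
      have := ih (j := k) (by simpa using hj)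
        (fun i h hik => hb (i + 1) (by simpa using h) (Nat.succ_lt_succ hik))
        (by simpa using hq)
      simpa [List.find?, ha] using this

-- on a strictly sorted list, find? (k ≤ ·) returns the least element ≥ k
lemma find?_sorted_least {L : List Int} (hs : L.Pairwise (· < ·)) {a k : Int} (ha : a ∈ L)
    (hak : k ≤ a) (hmin : ∀ x ∈ L, k ≤ x → a ≤ x) :
    L.find? (fun x => decide (k ≤ x)) = some a := by
  induction L with
  | nil => simp at ha
  | cons b t ih =>
    by_cases hkb : k ≤ b
    · have hab : a ≤ b := hmin b (List.mem_cons_self) hkb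
      have : a = b := by
        rcases List.mem_cons.mp ha with h | h
        · exact h
        · exact absurd (List.pairwise_cons.mp hs).1 (by intro hlt; exact absurd (hlt a h) (by omega))
      simp [List.find?, hkb, this]
    · have hab : a ≠ b := by intro h; exact hkb (h ▸ hak)
      have hat : a ∈ t := (List.mem_cons.mp ha).resolve_left hab
      have := ih (List.pairwise_cons.mp hs).2 hat
        (fun x hx hkx => hmin x (List.mem_cons_of_mem _ hx) hkx)
      simpa [List.find?, hkb] using this

-- bridge: s.find(p, k) for 0 ≤ k ≤ len(s) is the first precomputed position ≥ k (or -1)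
lemma findFrom_eq_find?_positions (cs p : List Char) (hp : p ≠ []) (k : Nat)
    (hk : k ≤ cs.length) :
    PySem.Chars.findFrom cs p (k : Int) none =
      ((pvPositions cs p).find? (fun x => decide ((k : Int) ≤ x))).getD (-1) := by
  rw [PySem.Chars.findFrom_natCast cs p k hk]
  by_cases h : PySem.Chars.find (cs.drop k) p = -1
  · rw [PySem.Chars.find_eq_neg_one_iff] at h
    have hnone : (pvPositions cs p).find? (fun x => decide ((k : Int) ≤ x)) = none := by
      rw [List.find?_eq_none]
      intro x hx hdec
      have hm := mem_pvPositions.mp hx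
      have hkx : (k : Int) ≤ x := of_decide_eq_true hdec
      have hsplit : cs.drop x.toNat = (cs.drop k).drop (x.toNat - k) := by
        rw [List.drop_drop]; congr 1; omega
      exact h (((hsplit ▸ hm.2.2).isInfix).trans ((cs.drop k).drop_suffix _).isInfix)
    have hfind : PySem.Chars.find (cs.drop k) p = -1 := by
      rw [PySem.Chars.find_eq_neg_one_iff]; exact h
    rw [if_pos hfind, hnone]
    rfl
  · have hr0 : 0 ≤ PySem.Chars.find (cs.drop k) p := by
      have := PySem.Chars.neg_one_le_find (cs.drop k) p; omega
    obtain ⟨hpre, hmin⟩ := PySem.Chars.find_spec (s := cs.drop k) (sub := p) hr0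
    set r := PySem.Chars.find (cs.drop k) p with hrdef
    have hdd : (cs.drop k).drop r.toNat = cs.drop (k + r.toNat) := by
      rw [List.drop_drop, Nat.add_comm]
    have hlen : k + r.toNat < cs.length := by
      have hne : cs.drop (k + r.toNat) ≠ [] := by
        intro hnil
        rw [hdd, hnil] at hpre
        exact hp (List.prefix_nil.mp hpre)
      have := List.drop_eq_nil_iff.not.mp hne; omega
    have hamem : ((k : Int) + r) ∈ pvPositions cs p := by
      rw [mem_pvPositions]
      refine ⟨by omega, by omega, ?_⟩
      have : ((k : Int) + r).toNat = k + r.toNat := by omega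
      rw [this, ← hdd]; exact hpre
    have hmin2 : ∀ x ∈ pvPositions cs p, (k : Int) ≤ x → (k : Int) + r ≤ x := by
      intro x hx hkx
      by_contra hlt
      have hm := mem_pvPositions.mp hx
      have hxk : x.toNat - k < r.toNat := by omega
      have hsplit : cs.drop x.toNat = (cs.drop k).drop (x.toNat - k) := by
        rw [List.drop_drop]; congr 1; omega
      exact hmin (x.toNat - k) hxk (hsplit ▸ hm.2.2)
    have hsome := find?_sorted_least (pairwise_pvPositions cs p) hamem
      (by omega : (k : Int) ≤ (k : Int) + r) hmin2
    rw [if_neg h, hsome]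
    rfl

-- specification of the two-pointer advance loop
lemma pvAdvance_spec (E : List Int) (sp : Int) (j : Nat) :
    j ≤ pvAdvance E sp j ∧ pvAdvance E sp j ≤ max j E.length ∧
      (∀ i, j ≤ i → (h : i < E.length) → i < pvAdvance E sp j → E[i] < sp) ∧
      (∀ h : pvAdvance E sp j < E.length, j ≤ pvAdvance E sp j → sp ≤ E[pvAdvance E sp j]) := by
  fun_induction pvAdvance E sp j with
  | case1 j hj hlt ih =>
    obtain ⟨ih1, ih2, ih3, ih4⟩ := ih
    refine ⟨by omega, by omega, ?_, ?_⟩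
    · intro i hji h hiadv
      rcases Nat.eq_or_lt_of_le hji with rfl | hji'
      · exact hlt
      · exact ih3 i hji' h hiadv
    · intro h _
      exact ih4 h (by omega)
  | case2 j hj hge =>
    exact ⟨Nat.le_refl _, by omega, by omega, fun h _ => by omega⟩
  | case3 j hj =>
    exact ⟨Nat.le_refl _, by omega, by omega, fun h _ => by omega⟩

-- main loop equivalence: A's find-rescan loop equals B's two-pointer walk over the
-- precomputed position lists, under the greedy invariants.
lemma pvLoop_agree (cs st et : List Char) (hst : st ≠ []) (het : et ≠ [])
    (S' : List Int) (P : List Int) (j : Nat) (last : Int) (fuel : Nat)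
    (hS : pvPositions cs st = P ++ S')
    (hfuel : S'.length + 1 ≤ fuel)
    (hj : j ≤ (pvPositions cs et).length)
    (hP : ∀ x ∈ P, x ≤ last)
    (hE : ∀ i, (h : i < (pvPositions cs et).length) → i < j → (pvPositions cs et)[i] ≤ last)
    (hlast : last = -1 ∨ last ∈ pvPositions cs et) :
    pvLoopA cs st et fuel last = pvLoopB (pvPositions cs et) S' j last := by
  induction S' generalizing P j last fuel with
  | nil =>
    obtain ⟨f, rfl⟩ : ∃ f, fuel = f + 1 := ⟨fuel - 1, by omega⟩
    have hk0 : 0 ≤ last + 1 ∧ last + 1 ≤ (cs.length : Int) := by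
      rcases hlast with rfl | hmem
      · exact ⟨by omega, by omega⟩
      · have := mem_pvPositions.mp hmem; exact ⟨by omega, by omega⟩
    have hcast : (((last + 1).toNat : Nat) : Int) = last + 1 := by omega
    have hff := findFrom_eq_find?_positions cs st hst (last + 1).toNat (by omega)
    rw [hcast] at hff
    have hnone : (pvPositions cs st).find? (fun x => decide (last + 1 ≤ x)) = none := by
      rw [List.find?_eq_none]
      intro x hx hdec
      rw [hS, List.append_nil] at hx
      exact absurd (of_decide_eq_true hdec) (by have := hP x hx; omega)
    simp only [pvLoopA, pvLoopB, hff, hnone, Option.getD_none]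
    simp
  | cons sp rest ih =>
    by_cases hsp : sp ≤ last
    · have := ih (P := P ++ [sp]) (j := j) (last := last) (fuel := fuel)
        (by rw [hS, List.append_assoc]; rfl)
        (by simp at hfuel ⊢; omega) hj
        (by intro x hx
            rcases List.mem_append.mp hx with h | h
            · exact hP x h
            · simpa using (List.mem_singleton.mp h) ▸ hsp)
        hE hlast
      simp only [pvLoopB, if_pos hsp]
      exact this
    · rw [not_le] at hsp
      obtain ⟨f, rfl⟩ : ∃ f, fuel = f + 1 := ⟨fuel - 1, by omega⟩
      have hspmem : sp ∈ pvPositions cs st := by rw [hS]; simp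
      have hspb := mem_pvPositions.mp hspmem
      have hlastb : 0 ≤ last + 1 ∧ last + 1 ≤ (cs.length : Int) := by
        rcases hlast with rfl | hmem
        · exact ⟨by omega, by omega⟩
        · have := mem_pvPositions.mp hmem; exact ⟨by omega, by omega⟩
      -- A's start search returns sp
      have hcast : (((last + 1).toNat : Nat) : Int) = last + 1 := by omega
      have hff := findFrom_eq_find?_positions cs st hst (last + 1).toNat (by omega)
      rw [hcast] at hff
      have hfindsp : (pvPositions cs st).find? (fun x => decide (last + 1 ≤ x)) = some sp := by
        rw [hS, List.find?_append]
        have h1 : P.find? (fun x => decide (last + 1 ≤ x)) = none := by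
          rw [List.find?_eq_none]
          intro x hx hdec
          exact absurd (of_decide_eq_true hdec) (by have := hP x hx; omega)
        have h2 : (sp :: rest).find? (fun x => decide (last + 1 ≤ x)) = some sp := by
          simp only [List.find?, decide_eq_true (show last + 1 ≤ sp by omega)]
        rw [h1, h2]
        rfl
      have hsp_ne : sp ≠ -1 := by omega
      -- A's end search from sp
      have hcast2 : ((sp.toNat : Nat) : Int) = sp := by omega
      have hff2 := findFrom_eq_find?_positions cs et het sp.toNat (by omega)
      rw [hcast2] at hff2
      set E := pvPositions cs et with hEdef
      obtain ⟨ha1, ha2, ha3, ha4⟩ := pvAdvance_spec E sp j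
      set j' := pvAdvance E sp j with hj'def
      have hj'le : j' ≤ E.length := by omega
      have hpref : ∀ i, (h : i < E.length) → i < j' → E[i] < sp := by
        intro i h hij'
        by_cases hij : i < j
        · have := hE i h hij; omega
        · exact ha3 i (by omega) h hij'
      by_cases hj'lt : j' < E.length
      · have hfind2 : E.find? (fun x => decide (sp ≤ x)) = some E[j'] :=
          find?_first hj'lt (fun i h hij' => decide_eq_false (by have := hpref i h hij'; omega))
            (decide_eq_true (ha4 hj'lt ha1))
        have hend := ha4 hj'lt ha1
        have hEj'b := mem_pvPositions.mp (E.getElem_mem hj'lt)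
        have hend_ne : E[j'] ≠ -1 := by omega
        have hrec := ih (P := P ++ [sp]) (j := j' + 1) (last := E[j']) (fuel := f)
          (by rw [hS, List.append_assoc]; rfl)
          (by simp at hfuel ⊢; omega)
          (by omega)
          (by intro x hx
              rcases List.mem_append.mp hx with h | h
              · have := hP x h; omega
              · have := List.mem_singleton.mp h; omega)
          (by intro i h hij'
              rcases Nat.lt_succ_iff_lt_or_eq.mp hij' with h' | rfl
              · have := hpref i h h'; omega
              · exact le_refl _)
          (Or.inr (E.getElem_mem hj'lt))
        simp only [pvLoopA, pvLoopB, hff, hfindsp, Option.getD_some, if_neg hsp_ne,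
          if_neg (by omega : ¬ sp ≤ last), hff2, hfind2,
          if_neg hend_ne, ← hj'def, dif_pos hj'lt]
        exact hrec
      · have hj'eq : j' = E.length := by omega
        have hfind2 : E.find? (fun x => decide (sp ≤ x)) = none := by
          rw [List.find?_eq_none]
          intro x hx hdec
          obtain ⟨i, h, rfl⟩ := List.mem_iff_getElem.mp hx
          exact absurd (of_decide_eq_true hdec) (by have := hpref i h (by omega); omega)
        simp only [pvLoopA, pvLoopB, hff, hfindsp, Option.getD_some, if_neg hsp_ne,
          if_neg (by omega : ¬ sp ≤ last), hff2, hfind2, Option.getD_none,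
          ← hj'def, dif_neg hj'lt]
        simp

-- per-tag agreement
lemma pvCheckTag_agree (cs tag : List Char) : pvCheckTagA cs tag = pvCheckTagB cs tag := by
  unfold pvCheckTagA pvCheckTagB
  by_cases hc : PySem.Chars.count cs (pvStartTag tag) ≠ PySem.Chars.count cs (pvEndTag tag)
  · simp [hc]
  · have hlen : (pvPositions cs (pvStartTag tag)).length ≤ cs.length := by
      have h1 := List.length_filter_le
        (fun i => PySem.Chars.startswith (cs.drop i.toNat) (pvStartTag tag))
        (PySem.List.pyRange 0 cs.length 1)
      have h2 : (PySem.List.pyRange 0 (cs.length : Int) 1).length = cs.length := by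
        rw [PySem.List.length_pyRange_one]; omega
      simpa [pvPositions, h2] using h1
    have := pvLoop_agree cs (pvStartTag tag) (pvEndTag tag)
      (by simp [pvStartTag]) (by simp [pvEndTag])
      (pvPositions cs (pvStartTag tag)) [] 0 (-1) (cs.length + 1)
      (by simp) (by omega) (Nat.zero_le _)
      (by simp) (by omega) (Or.inl rfl)
    simp [hc, this]

-- ===== VERDICT (by name: the statement is the Claim_ definition above) =====
theorem check_tags_balance_spec : Claim_equal_check_tags_balance := by
  intro s _hdom
  show check_tags_balance s = check_tags_balance_alt s
  simp [check_tags_balance, check_tags_balance_alt, pvCheckTag_agree]
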